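-- pv_equiv track=rewrite | github.com/0Zeta/RockPaperScissors | best_submission.py | find_all_longest
-- ===== SOURCE A (Python) =====
-- from collections import namedtuple
-- from typing import List
-- import operator
--
-- HistMatchResult = namedtuple("HistMatchResult", "idx length")
--
-- def find_all_longest(seq, max_len=None) -> List[HistMatchResult]:
--     """
--     Find all indices where end of `seq` matches some past.
--     """
--     result = []
--     i_search_start = len(seq) - 2
--
--     while i_search_start > 0:
--         i_sub = -1
--         i_search = i_search_start
--         length = 0
--
--         while i_search >= 0 and seq[i_sub] == seq[i_search]:
--             length += 1
--             i_sub -= 1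
--             i_search -= 1
--
--             if max_len is not None and length > max_len:
--                 break
--
--         if length > 0:
--             result.append(HistMatchResult(i_search_start + 1, length))
--
--         i_search_start -= 1
--
--     result = sorted(result, key=operator.attrgetter("length"), reverse=True)
--     return result
-- ===== SOURCE B (Python) =====
-- from collections import namedtuple
-- from typing import List
--
-- HistMatchResult = namedtuple("HistMatchResult", "idx length")
--
--
-- def find_all_longest(seq, max_len=None) -> List[HistMatchResult]:
--     """
--     Find all indices where end of `seq` matches some past.
--
--     Breadth-first: all candidate start positions are extended simultaneously,
--     one comparison depth per round; a candidate that stops matching at depth t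
--     has match length exactly t, so results are bucketed by the round in which
--     the candidate dies and the buckets are emitted in reverse round order --
--     no comparison sort is needed.
--     """
--     n = len(seq)
--     cap = n if max_len is None else max(1, max_len + 1)
--     active = list(range(n - 2, 0, -1))  # start positions, descending
--     groups = []
--     t = 0
--     while active and t < cap:
--         survivors = []
--         died = []
--         for i in active:
--             if i - t >= 0 and seq[i - t] == seq[n - 1 - t]:
--                 survivors.append(i)
--             elif t > 0:
--                 died.append(HistMatchResult(i + 1, t))
--         if died:
--             groups.append(died)
--         active = survivors
--         t += 1
--     if active:
--         groups.append([HistMatchResult(i + 1, t) for i in active])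
--     result = []
--     for g in reversed(groups):
--         result.extend(g)
--     return result
-- ===== Notes on version B (the rewrite author's own statement) =====
-- stated objective: alternative
-- what changed: A extends each start position depth-first to completion with nested while loops and then stable-sorts the results by length; B sweeps breadth-first, extending all candidate start positions one comparison depth per round in a shrinking active list, buckets each result by the round in which its candidate dies, and emits the buckets in reverse round order, so the sort disappears.
import Mathlib
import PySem

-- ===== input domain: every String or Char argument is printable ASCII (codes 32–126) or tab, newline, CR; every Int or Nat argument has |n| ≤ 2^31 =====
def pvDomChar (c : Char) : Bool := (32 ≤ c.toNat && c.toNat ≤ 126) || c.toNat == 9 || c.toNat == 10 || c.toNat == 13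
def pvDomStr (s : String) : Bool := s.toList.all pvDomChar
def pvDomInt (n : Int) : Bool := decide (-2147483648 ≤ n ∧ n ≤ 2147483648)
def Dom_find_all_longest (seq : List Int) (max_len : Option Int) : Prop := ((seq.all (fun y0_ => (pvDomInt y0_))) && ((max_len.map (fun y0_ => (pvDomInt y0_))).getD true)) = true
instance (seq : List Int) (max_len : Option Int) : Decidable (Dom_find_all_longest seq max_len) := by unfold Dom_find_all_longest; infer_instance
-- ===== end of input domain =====

-- B replaces A's depth-first per-start-position scan plus final sort by a breadth-first sweep:
-- all candidate start positions are extended one comparison depth per round in a shrinking active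
-- list, results are bucketed by the round in which a candidate dies, and the buckets are emitted
-- in reverse round order, so no comparison sort is needed (objective: alternative).

-- ===== PORT A =====
-- inner `while i_search >= 0 and seq[i_sub] == seq[i_search]` loop of A.
-- The `(none, _)` match arm is unreachable on A's real calls (both indices are then in range).
def pvInnerA (seq : List Int) (max_len : Option Int) (i_sub i_search length : Int) : Int :=
  if _h : 0 ≤ i_search then
    match PySem.List.pyGet? seq i_sub, PySem.List.pyGet? seq i_search with
    | some a, some b =>
      if a = b then
        let length' := length + 1
        match max_len with
        | some m => if length' > m then length' else pvInnerA seq max_len (i_sub - 1) (i_search - 1) length'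
        | none => pvInnerA seq max_len (i_sub - 1) (i_search - 1) length'
      else length
    | _, _ => length
  else length
termination_by (i_search + 1).toNat
decreasing_by all_goals omega

-- outer `while i_search_start > 0` loop of A, carrying `result`.
def pvOuterA (seq : List Int) (max_len : Option Int) (i_search_start : Int) (result : List (Int × Int)) : List (Int × Int) :=
  if _h : 0 < i_search_start then
    let length := pvInnerA seq max_len (-1) i_search_start 0
    let result' := if 0 < length then result ++ [(i_search_start + 1, length)] else result
    pvOuterA seq max_len (i_search_start - 1) result'
  else result
termination_by i_search_start.toNat
decreasing_by omega

def find_all_longest (seq : List Int) (max_len : Option Int) : List (Int × Int) :=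
  PySem.List.sorted (pvOuterA seq max_len ((seq.length : Int) - 2) []) (fun p => p.2) true

-- ===== PORT B =====
-- body of B's `for i in active` round: appends i to survivors or (i+1, t) to died.
def pvStepB (seq : List Int) (t : Int) (st : List Int × List (Int × Int)) (i : Int) : List Int × List (Int × Int) :=
  if 0 ≤ i - t ∧ PySem.List.pyGet? seq (i - t) = PySem.List.pyGet? seq ((seq.length : Int) - 1 - t) then
    (st.1 ++ [i], st.2)
  else if 0 < t then (st.1, st.2 ++ [(i + 1, t)])
  else st

-- B's `while active and t < cap` loop; returns (active, t, groups) at exit.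
def pvLoopB (seq : List Int) (cap : Int) (active : List Int) (t : Int) (groups : List (List (Int × Int))) : List Int × Int × List (List (Int × Int)) :=
  if _h : active ≠ [] ∧ t < cap then
    let sd := active.foldl (pvStepB seq t) ([], [])
    let groups' := if sd.2 ≠ [] then groups ++ [sd.2] else groups
    pvLoopB seq cap sd.1 (t + 1) groups'
  else (active, t, groups)
termination_by (cap - t).toNat
decreasing_by omega

def find_all_longest_alt (seq : List Int) (max_len : Option Int) : List (Int × Int) :=
  let n : Int := seq.length
  let cap : Int := match max_len with | none => n | some m => max 1 (m + 1)
  let res := pvLoopB seq cap (PySem.List.pyRange (n - 2) 0 (-1)) 0 []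
  let groups := if res.1 ≠ [] then res.2.2 ++ [res.1.map (fun i => (i + 1, res.2.1))] else res.2.2
  groups.reverse.foldl (fun acc g => acc ++ g) []

-- ===== PRECONDITION & SPEC =====
def Spec_find_all_longest (seq : List Int) (max_len : Option Int) (out : List (Int × Int)) : Prop := out = find_all_longest_alt seq max_len
instance (seq : List Int) (max_len : Option Int) (out : List (Int × Int)) : Decidable (Spec_find_all_longest seq max_len out) := by unfold Spec_find_all_longest; infer_instance

-- ===== CLAIM (what is proved, stated in full; the proofs are below) =====
def Claim_equal_find_all_longest : Prop := ∀ (seq : List Int) (max_len : Option Int), Dom_find_all_longest seq max_len → Spec_find_all_longest seq max_len (find_all_longest seq max_len)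

-- ===== LEMMAS AND PROOFS =====

-- `pvOk seq i t`: comparison at depth t for start position i succeeds.
def pvOk (seq : List Int) (i t : Nat) : Bool :=
  decide (t ≤ i) && (seq.getD (i - t) 0 == seq.getD (seq.length - 1 - t) 0)

-- uncapped match length for start position i, counting from depth t.
def pvMl (seq : List Int) (i t : Nat) : Nat :=
  if h : pvOk seq i t = true then pvMl seq i (t + 1) + 1 else 0
termination_by i + 1 - t
decreasing_by simp [pvOk] at h; omega

def pvCapN (seq : List Int) (max_len : Option Int) : Nat :=
  match max_len with | none => seq.length | some m => (max 1 (m + 1)).toNat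

def pvL (seq : List Int) (max_len : Option Int) (i : Nat) : Nat :=
  min (pvMl seq i 0) (pvCapN seq max_len)

-- start positions, descending (Python's range(n-2, 0, -1)).
def pvD (seq : List Int) : List Nat := (List.range' 1 (seq.length - 2)).reverse

def pvGA (seq : List Int) (max_len : Option Int) (i : Nat) : List (Int × Int) :=
  if 0 < pvL seq max_len i then [((i : Int) + 1, (pvL seq max_len i : Int))] else []

def pvBucket (seq : List Int) (max_len : Option Int) (ℓ : Nat) : List (Int × Int) :=
  ((pvD seq).filter (fun i => pvL seq max_len i == ℓ)).map (fun i : Nat => ((i : Int) + 1, (ℓ : Int)))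

def pvActive (seq : List Int) (t : Nat) : List Int :=
  ((pvD seq).filter (fun i => decide (t ≤ pvMl seq i 0))).map (fun i : Nat => (i : Int))

def pvFlatG (G : List (List (Int × Int))) : List (Int × Int) :=
  G.reverse.foldl (fun acc g => acc ++ g) []

def pvFin (res : List Int × Int × List (List (Int × Int))) : List (Int × Int) :=
  (if res.1 ≠ [] then res.2.2 ++ [res.1.map (fun i => (i + 1, res.2.1))] else res.2.2).reverse.foldl
    (fun acc g => acc ++ g) []

-- ml characterisations
lemma pvMl_ge_iff (seq : List Int) (i : Nat) :
    ∀ (t b : Nat), t ≤ pvMl seq i b ↔ ∀ u, u < t → pvOk seq i (b + u) = true := by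
  intro t
  induction t with
  | zero => intro b; simp
  | succ t ih =>
    intro b
    rw [pvMl]
    by_cases h : pvOk seq i b = true
    · rw [dif_pos h]
      constructor
      · intro hle u hu
        rcases Nat.eq_zero_or_pos u with h0 | h0
        · subst h0; simpa using h
        · have := (ih (b + 1)).mp (by omega) (u - 1) (by omega)
          have harg : b + 1 + (u - 1) = b + u := by omega
          rwa [harg] at this
      · intro hall
        have : t ≤ pvMl seq i (b + 1) := by
          refine (ih (b + 1)).mpr ?_
          intro u hu
          have := hall (u + 1) (by omega)
          have harg : b + (u + 1) = b + 1 + u := by omega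
          rwa [harg] at this
        omega
    · rw [dif_neg h]
      constructor
      · intro hle; omega
      · intro hall
        exact absurd (by simpa using hall 0 (by omega)) h

lemma pvSurv_iff (seq : List Int) (i t : Nat) :
    (t ≤ pvMl seq i 0 ∧ pvOk seq i t = true) ↔ t + 1 ≤ pvMl seq i 0 := by
  rw [pvMl_ge_iff, pvMl_ge_iff]
  constructor
  · rintro ⟨hall, hok⟩ u hu
    rcases Nat.lt_or_ge u t with h | h
    · exact hall u h
    · have : u = t := by omega
      subst this; simpa using hok
  · intro hall
    exact ⟨fun u hu => hall u (by omega), by simpa using hall t (by omega)⟩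

lemma pvDie_iff (seq : List Int) (i t : Nat) :
    (t ≤ pvMl seq i 0 ∧ pvOk seq i t = false) ↔ pvMl seq i 0 = t := by
  constructor
  · rintro ⟨hge, hnok⟩
    by_contra hne
    have hgt : t + 1 ≤ pvMl seq i 0 := by omega
    have := (pvSurv_iff seq i t).mpr hgt
    rw [this.2] at hnok
    exact absurd hnok (by simp)
  · intro heq
    refine ⟨by omega, ?_⟩
    by_contra hne
    have hok : pvOk seq i t = true := by
      cases h : pvOk seq i t
      · exact absurd h hne
      · rfl
    have := (pvSurv_iff seq i t).mp ⟨by omega, hok⟩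
    omega

-- A's inner loop computes min(t + ml, cap)
lemma pvInnerA_eq (seq : List Int) (max_len : Option Int) (i : Nat) (_hi1 : 1 ≤ i)
    (hi2 : i + 2 ≤ seq.length) :
    ∀ (d t : Nat), i + 1 - t ≤ d → t < pvCapN seq max_len → t ≤ i + 1 →
      pvInnerA seq max_len (-1 - (t : Int)) ((i : Int) - (t : Int)) (t : Int)
        = ((min (t + pvMl seq i t) (pvCapN seq max_len) : Nat) : Int) := by
  intro d
  induction d with
  | zero =>
    intro t hd hcap hti
    have ht : t = i + 1 := by omega
    subst ht
    rw [pvInnerA, dif_neg (by omega)]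
    have hok : pvOk seq i (i + 1) = false := by simp [pvOk]
    rw [pvMl, dif_neg (by simp [hok])]
    have : min (i + 1 + 0) (pvCapN seq max_len) = i + 1 := by omega
    rw [this]
  | succ d ih =>
    intro t hd hcap hti
    by_cases hteq : t = i + 1
    · subst hteq
      rw [pvInnerA, dif_neg (by omega)]
      have hok : pvOk seq i (i + 1) = false := by simp [pvOk]
      rw [pvMl, dif_neg (by simp [hok])]
      have : min (i + 1 + 0) (pvCapN seq max_len) = i + 1 := by omega
      rw [this]
    · have hti' : t ≤ i := by omega
      have hitn : i - t < seq.length := by omega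
      have hbtn : seq.length - 1 - t < seq.length := by omega
      have e2 : PySem.List.pyGet? seq ((i : Int) - (t : Int)) = some (seq.getD (i - t) 0) := by
        have harg : ((i : Int) - (t : Int)) = (((i - t : Nat)) : Int) := by omega
        rw [harg, PySem.List.pyGet?_natCast seq (i - t), List.getElem?_eq_getElem hitn,
          List.getD_eq_getElem seq 0 hitn]
      have e1 : PySem.List.pyGet? seq (-1 - (t : Int)) = some (seq.getD (seq.length - 1 - t) 0) := by
        have harg : (-1 - (t : Int)) = -(((t + 1 : Nat)) : Int) := by push_cast; ring
        rw [harg, PySem.List.pyGet?_neg_natCast seq (t + 1) (by omega) (by omega)]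
        have hidx : seq.length - (t + 1) = seq.length - 1 - t := by omega
        rw [hidx, List.getElem?_eq_getElem hbtn, List.getD_eq_getElem seq 0 hbtn]
      rw [pvInnerA, dif_pos (by omega), e1, e2]
      by_cases hab : seq.getD (seq.length - 1 - t) 0 = seq.getD (i - t) 0
      · have hok : pvOk seq i t = true := by
          unfold pvOk
          rw [hab]
          simp [hti']
        have hml : pvMl seq i t = pvMl seq i (t + 1) + 1 := by rw [pvMl, dif_pos hok]
        simp only [hab, ↓reduceIte]
        have harg1 : (-1 - (t : Int) - 1) = -1 - ((t + 1 : Nat) : Int) := by push_cast; ring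
        have harg2 : ((i : Int) - (t : Int) - 1) = (i : Int) - ((t + 1 : Nat) : Int) := by push_cast; ring
        have harg3 : ((t : Int) + 1) = ((t + 1 : Nat) : Int) := by push_cast; ring
        cases max_len with
        | none =>
          simp only []
          rw [harg1, harg2, harg3, ih (t + 1) (by omega)
            (by simp only [pvCapN]; omega) (by omega)]
          congr 1
          omega
        | some m =>
          simp only []
          have hcapsome : pvCapN seq (some m) = (max 1 (m + 1)).toNat := rfl
          by_cases hbm : (t : Int) + 1 > m
          · rw [if_pos hbm]
            have hcaple : pvCapN seq (some m) ≤ t + 1 := by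
              rw [hcapsome]; omega
            have : min (t + pvMl seq i t) (pvCapN seq (some m)) = t + 1 := by
              rw [hcapsome] at hcap ⊢
              omega
            rw [this]
            exact harg3
          · rw [if_neg hbm, harg1, harg2, harg3, ih (t + 1) (by omega)
              (by rw [hcapsome] at hcap ⊢; omega) (by omega)]
            congr 1
            omega
      · have hne' : (seq.getD (seq.length - 1 - t) 0 = seq.getD (i - t) 0) = False := by
          simp only [eq_iff_iff, iff_false]
          exact hab
        have hok : pvOk seq i t = false := by
          unfold pvOk
          have hne : (seq.getD (i - t) 0 == seq.getD (seq.length - 1 - t) 0) = false := by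
            simp only [beq_eq_false_iff_ne, ne_eq]
            exact fun hc => hab hc.symm
          rw [hne, Bool.and_false]
        have hml : pvMl seq i t = 0 := by rw [pvMl, dif_neg (by simp [hok])]
        simp only [hne', ↓reduceIte, hml]
        have : min (t + 0) (pvCapN seq max_len) = t := by omega
        rw [this]

-- A's outer loop, as a flatMap over start positions descending
lemma pvOuterA_eq (seq : List Int) (max_len : Option Int) :
    ∀ (s : Nat) (acc : List (Int × Int)), s + 2 ≤ seq.length →
      pvOuterA seq max_len (s : Int) acc
        = acc ++ ((List.range' 1 s).reverse).flatMap (pvGA seq max_len) := by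
  intro s
  induction s with
  | zero =>
    intro acc _
    rw [pvOuterA, dif_neg (by omega)]
    simp
  | succ s ih =>
    intro acc h
    rw [pvOuterA, dif_pos (by push_cast; omega)]
    have hinner : pvInnerA seq max_len (-1) (((s + 1 : Nat)) : Int) 0
        = ((pvL seq max_len (s + 1) : Nat) : Int) := by
      have := pvInnerA_eq seq max_len (s + 1) (by omega) (by omega) (s + 2) 0 (by omega)
        (by
          cases max_len with
          | none => simp only [pvCapN]; omega
          | some m => simp only [pvCapN]; omega)
        (by omega)
      simpa [pvL] using this
    have hrec : ((s + 1 : Nat) : Int) - 1 = ((s : Nat) : Int) := by push_cast; ring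
    have hrange : (List.range' 1 (s + 1)).reverse
        = (s + 1) :: (List.range' 1 s).reverse := by
      rw [List.range'_concat]
      simp [Nat.add_comm]
    dsimp only
    rw [hinner, hrec, hrange]
    simp only [List.flatMap_cons]
    by_cases hpos : 0 < pvL seq max_len (s + 1)
    · rw [if_pos (by exact_mod_cast hpos), ih _ (by omega)]
      unfold pvGA
      rw [if_pos hpos]
      simp
    · rw [if_neg (by exact_mod_cast hpos), ih _ (by omega)]
      unfold pvGA
      rw [if_neg hpos]
      simp

-- B's round fold
lemma pvFoldB_eq (seq : List Int) (t : Nat) :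
    ∀ (act : List Nat) (s0 : List Int) (d0 : List (Int × Int)),
      (∀ i ∈ act, i + 2 ≤ seq.length) →
      (act.map (fun i : Nat => (i : Int))).foldl (pvStepB seq (t : Int)) (s0, d0)
        = (s0 ++ (act.filter (fun i => pvOk seq i t)).map (fun i : Nat => (i : Int)),
           d0 ++ if 0 < t then (act.filter (fun i => !pvOk seq i t)).map (fun i : Nat => ((i : Int) + 1, (t : Int))) else []) := by
  intro act
  induction act with
  | nil =>
    intro s0 d0 _
    rw [List.map_nil, List.foldl_nil]
    simp
  | cons i rest ih =>
    intro s0 d0 hall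
    have hi : i + 2 ≤ seq.length := hall i (by simp)
    have hall' : ∀ j ∈ rest, j + 2 ≤ seq.length := fun j hj => hall j (by simp [hj])
    simp only [List.map_cons, List.foldl_cons]
    by_cases hti : t ≤ i
    · have hitn : i - t < seq.length := by omega
      have hbtn : seq.length - 1 - t < seq.length := by omega
      have e2 : PySem.List.pyGet? seq ((i : Int) - (t : Int)) = some (seq.getD (i - t) 0) := by
        have harg : ((i : Int) - (t : Int)) = (((i - t : Nat)) : Int) := by omega
        rw [harg, PySem.List.pyGet?_natCast seq (i - t), List.getElem?_eq_getElem hitn,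
          List.getD_eq_getElem seq 0 hitn]
      have e1 : PySem.List.pyGet? seq ((seq.length : Int) - 1 - (t : Int))
          = some (seq.getD (seq.length - 1 - t) 0) := by
        have harg : ((seq.length : Int) - 1 - (t : Int)) = (((seq.length - 1 - t : Nat)) : Int) := by omega
        rw [harg, PySem.List.pyGet?_natCast seq (seq.length - 1 - t),
          List.getElem?_eq_getElem hbtn, List.getD_eq_getElem seq 0 hbtn]
      by_cases hval : seq.getD (i - t) 0 = seq.getD (seq.length - 1 - t) 0
      · have hok : pvOk seq i t = true := by
          unfold pvOk
          rw [hval]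
          simp [hti]
        have hstep : pvStepB seq (t : Int) (s0, d0) (i : Int) = (s0 ++ [(i : Int)], d0) := by
          unfold pvStepB
          rw [if_pos ⟨by omega, by rw [e1, e2, hval]⟩]
        rw [hstep, ih (s0 ++ [(i : Int)]) d0 hall']
        simp [hok]
      · have hok : pvOk seq i t = false := by
          unfold pvOk
          have hne : (seq.getD (i - t) 0 == seq.getD (seq.length - 1 - t) 0) = false := by
            simp only [beq_eq_false_iff_ne, ne_eq]
            exact hval
          rw [hne, Bool.and_false]
        have hstep : pvStepB seq (t : Int) (s0, d0) (i : Int)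
            = if 0 < (t : Int) then (s0, d0 ++ [((i : Int) + 1, (t : Int))]) else (s0, d0) := by
          unfold pvStepB
          rw [if_neg (by
            rintro ⟨-, hc⟩
            rw [e1, e2] at hc
            exact hval (Option.some.injEq _ _ ▸ hc))]
        by_cases ht0 : 0 < t
        · rw [hstep, if_pos (by exact_mod_cast ht0), ih s0 (d0 ++ [((i : Int) + 1, (t : Int))]) hall']
          simp [hok, ht0]
        · rw [hstep, if_neg (by exact_mod_cast ht0), ih s0 d0 hall']
          simp [hok, ht0]
    · have hok : pvOk seq i t = false := by
        unfold pvOk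
        rw [decide_eq_false hti, Bool.false_and]
      have hstep : pvStepB seq (t : Int) (s0, d0) (i : Int)
          = if 0 < (t : Int) then (s0, d0 ++ [((i : Int) + 1, (t : Int))]) else (s0, d0) := by
        unfold pvStepB
        rw [if_neg (by rintro ⟨hc, -⟩; omega)]
      by_cases ht0 : 0 < t
      · rw [hstep, if_pos (by exact_mod_cast ht0), ih s0 (d0 ++ [((i : Int) + 1, (t : Int))]) hall']
        simp [hok, ht0]
      · rw [hstep, if_neg (by exact_mod_cast ht0), ih s0 d0 hall']
        simp [hok, ht0]

lemma pvFoldlAppend (L : List (List (Int × Int))) :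
    ∀ acc, L.foldl (fun a g => a ++ g) acc = acc ++ L.flatten := by
  induction L with
  | nil => intro acc; simp
  | cons g L ih => intro acc; simp [ih]

lemma pvFlatG_append (G : List (List (Int × Int))) (g : List (Int × Int)) :
    pvFlatG (G ++ [g]) = g ++ pvFlatG G := by
  unfold pvFlatG
  rw [List.reverse_append, pvFoldlAppend, pvFoldlAppend]
  simp

-- B's loop at t = cap: the final survivors group is exactly the cap-length bucket
lemma pvLoopB_end (seq : List Int) (max_len : Option Int) (G : List (List (Int × Int)))
    (_ht1 : 1 ≤ pvCapN seq max_len) :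
    pvFin (pvLoopB seq (pvCapN seq max_len : Int) (pvActive seq (pvCapN seq max_len))
        ((pvCapN seq max_len : Nat) : Int) G)
      = ((List.range' (pvCapN seq max_len) (pvCapN seq max_len - pvCapN seq max_len + 1)).reverse).flatMap
          (pvBucket seq max_len) ++ pvFlatG G := by
  rw [pvLoopB, dif_neg (by rintro ⟨-, hc⟩; omega)]
  have hrange : pvCapN seq max_len - pvCapN seq max_len + 1 = 1 := by omega
  rw [hrange]
  have hfilt : (pvD seq).filter (fun i => pvL seq max_len i == pvCapN seq max_len)
      = (pvD seq).filter (fun i => decide (pvCapN seq max_len ≤ pvMl seq i 0)) := by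
    apply List.filter_congr
    intro i _
    unfold pvL
    by_cases h : pvCapN seq max_len ≤ pvMl seq i 0
    · have hm : min (pvMl seq i 0) (pvCapN seq max_len) = pvCapN seq max_len := by omega
      simp [h]
    · have hm : ¬ (min (pvMl seq i 0) (pvCapN seq max_len) = pvCapN seq max_len) := by omega
      simp [hm, h]
  by_cases hA : pvActive seq (pvCapN seq max_len) = []
  · rw [hA]
    have hfin : pvFin ([], ((pvCapN seq max_len : Nat) : Int), G) = pvFlatG G := by
      unfold pvFin pvFlatG
      simp
    rw [hfin]
    have hbe : pvBucket seq max_len (pvCapN seq max_len) = [] := by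
      unfold pvBucket
      rw [hfilt]
      have hA' : ((pvD seq).filter (fun i => decide (pvCapN seq max_len ≤ pvMl seq i 0))).map
          (fun i : Nat => (i : Int)) = [] := hA
      rw [List.map_eq_nil_iff.mp hA', List.map_nil]
    simp [hbe]
  · have hfin : pvFin (pvActive seq (pvCapN seq max_len), ((pvCapN seq max_len : Nat) : Int), G)
        = pvBucket seq max_len (pvCapN seq max_len) ++ pvFlatG G := by
      unfold pvFin pvFlatG
      rw [if_pos (by exact hA), List.reverse_append, pvFoldlAppend, pvFoldlAppend]
      simp only [List.reverse_cons, List.reverse_nil, List.nil_append]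
      unfold pvBucket pvActive
      rw [hfilt, List.map_map]
      rfl
    rw [hfin]
    simp

-- B's loop, fully characterised
lemma pvLoopB_eq (seq : List Int) (max_len : Option Int) :
    ∀ (fuel t : Nat) (G : List (List (Int × Int))), 1 ≤ t → t ≤ pvCapN seq max_len →
      pvCapN seq max_len - t ≤ fuel →
      pvFin (pvLoopB seq (pvCapN seq max_len : Int) (pvActive seq t) (t : Int) G)
        = ((List.range' t (pvCapN seq max_len - t + 1)).reverse).flatMap (pvBucket seq max_len)
            ++ pvFlatG G := by
  intro fuel
  induction fuel with
  | zero =>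
    intro t G ht1 ht2 hf
    have hteq : t = pvCapN seq max_len := by omega
    subst hteq
    exact pvLoopB_end seq max_len G ht1
  | succ fuel ih =>
    intro t G ht1 ht2 hf
    by_cases hte : t = pvCapN seq max_len
    · subst hte
      exact pvLoopB_end seq max_len G ht1
    · have htlt : t < pvCapN seq max_len := by omega
      by_cases hA : pvActive seq t = []
      · rw [pvLoopB, dif_neg (by rw [hA]; simp)]
        have hfin : pvFin ([], (t : Int), G) = pvFlatG G := by
          unfold pvFin pvFlatG
          simp
        rw [hA, hfin]
        have hnil : ((List.range' t (pvCapN seq max_len - t + 1)).reverse).flatMap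
            (pvBucket seq max_len) = [] := by
          rw [List.flatMap_eq_nil_iff]
          intro ℓ hℓ
          rw [List.mem_reverse, List.mem_range'_1] at hℓ
          have hA' : ((pvD seq).filter (fun i => decide (t ≤ pvMl seq i 0))).map
              (fun i : Nat => (i : Int)) = [] := hA
          have hfe : (pvD seq).filter (fun i => decide (t ≤ pvMl seq i 0)) = [] :=
            List.map_eq_nil_iff.mp hA' 
          unfold pvBucket
          rw [List.filter_eq_nil_iff.mpr, List.map_nil]
          intro i hi
          have hnot : ¬ (t ≤ pvMl seq i 0) := by
            have := List.filter_eq_nil_iff.mp hfe i hi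
            simpa using this
          simp only [beq_iff_eq]
          intro hLi
          unfold pvL at hLi
          omega
        rw [hnil, List.nil_append]
      · rw [pvLoopB, dif_pos ⟨hA, by exact_mod_cast htlt⟩]
        have hmem : ∀ i ∈ (pvD seq).filter (fun i => decide (t ≤ pvMl seq i 0)),
            i + 2 ≤ seq.length := by
          intro i hi
          have hiD : i ∈ pvD seq := List.mem_of_mem_filter hi
          unfold pvD at hiD
          rw [List.mem_reverse, List.mem_range'_1] at hiD
          omega
        have hfold := pvFoldB_eq seq t ((pvD seq).filter (fun i => decide (t ≤ pvMl seq i 0)))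
          [] [] hmem
        have hsurv : ((pvD seq).filter (fun i => decide (t ≤ pvMl seq i 0))).filter
            (fun i => pvOk seq i t) = (pvD seq).filter (fun i => decide (t + 1 ≤ pvMl seq i 0)) := by
          rw [List.filter_filter]
          apply List.filter_congr
          intro i _
          by_cases h1 : t ≤ pvMl seq i 0
          · cases h2 : pvOk seq i t
            · have hmlt := (pvDie_iff seq i t).mp ⟨h1, h2⟩
              have hn : ¬ (t + 1 ≤ pvMl seq i 0) := by omega
              simp [h1, hn]
            · have hs := (pvSurv_iff seq i t).mp ⟨h1, h2⟩
              simp [h1, hs]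
          · have hn : ¬ (t + 1 ≤ pvMl seq i 0) := by omega
            simp [h1, hn]
        have hdied : ((pvD seq).filter (fun i => decide (t ≤ pvMl seq i 0))).filter
            (fun i => !pvOk seq i t) = (pvD seq).filter (fun i => pvL seq max_len i == t) := by
          rw [List.filter_filter]
          apply List.filter_congr
          intro i _
          by_cases h1 : t ≤ pvMl seq i 0
          · cases h2 : pvOk seq i t
            · have hmlt := (pvDie_iff seq i t).mp ⟨h1, h2⟩
              have hL : pvL seq max_len i = t := by unfold pvL; omega
              simp [h1, hL]
            · have hs := (pvSurv_iff seq i t).mp ⟨h1, h2⟩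
              have hL : ¬ (pvL seq max_len i = t) := by unfold pvL; omega
              simp [h1, hL]
          · have hL : ¬ (pvL seq max_len i = t) := by unfold pvL; omega
            simp [h1, hL]
        have hdmap : (((pvD seq).filter (fun i => decide (t ≤ pvMl seq i 0))).filter
              (fun i => !pvOk seq i t)).map (fun i : Nat => ((i : Int) + 1, (t : Int)))
            = pvBucket seq max_len t := by
          rw [hdied]; rfl
        dsimp only
        rw [show (pvActive seq t).foldl (pvStepB seq (t : Int)) ([], [])
            = (((pvD seq).filter (fun i => decide (t ≤ pvMl seq i 0))).map
                (fun i : Nat => (i : Int))).foldl (pvStepB seq (t : Int)) ([], []) from rfl]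
        rw [hfold]
        simp only [List.nil_append]
        rw [hsurv, if_pos (show 0 < t from ht1), hdmap]
        have hih := ih (t + 1) (if pvBucket seq max_len t ≠ [] then G ++ [pvBucket seq max_len t] else G)
          (by omega) (by omega) (by omega)
        have hact : ((pvD seq).filter (fun i => decide (t + 1 ≤ pvMl seq i 0))).map
            (fun i : Nat => (i : Int)) = pvActive seq (t + 1) := rfl
        have hcast : ((t : Int) + 1) = ((t + 1 : Nat) : Int) := by push_cast; ring
        rw [hact, hcast, hih]
        have hflat : pvFlatG (if pvBucket seq max_len t ≠ [] then G ++ [pvBucket seq max_len t] else G)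
            = pvBucket seq max_len t ++ pvFlatG G := by
          by_cases hb : pvBucket seq max_len t = []
          · rw [if_neg (by simp [hb]), hb, List.nil_append]
          · rw [if_pos hb, pvFlatG_append]
        rw [hflat]
        have hrange : (List.range' t (pvCapN seq max_len - t + 1)).reverse
            = (List.range' (t + 1) (pvCapN seq max_len - (t + 1) + 1)).reverse ++ [t] := by
          have h1 : pvCapN seq max_len - t + 1 = (pvCapN seq max_len - (t + 1) + 1) + 1 := by omega
          rw [h1, List.range'_succ, List.reverse_cons]
        rw [hrange, List.flatMap_append]
        simp

-- insertion into a bucketed list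
lemma pvInsertBy_skip {α : Type} (before : α → α → Bool) (x : α) :
    ∀ (as bs : List α), (∀ y ∈ as, before x y = false) →
      PySem.List.insertBy before x (as ++ bs) = as ++ PySem.List.insertBy before x bs := by
  intro as
  induction as with
  | nil => intro bs _; simp
  | cons a as ih =>
    intro bs hall
    have ha : before x a = false := hall a (by simp)
    simp only [List.cons_append, PySem.List.insertBy, ha]
    simp only [Bool.false_eq_true, if_false]
    rw [ih bs (fun y hy => hall y (by simp [hy]))]

lemma pvInsertBy_front {α : Type} (before : α → α → Bool) (x : α) (ys : List α)
    (h : ∀ y ∈ ys, before x y = true) :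
    PySem.List.insertBy before x ys = x :: ys := by
  cases ys with
  | nil => rfl
  | cons y ys => simp [PySem.List.insertBy, h y (by simp)]

lemma pvFlatMap_filter_not {α : Type} (key : α → Int) (x : α) (ys : List α) :
    ∀ (l : List Int), (∀ ℓ' ∈ l, ℓ' ≠ key x) →
      l.flatMap (fun ℓ' => (ys ++ [x]).filter (fun y => key y == ℓ'))
        = l.flatMap (fun ℓ' => ys.filter (fun y => key y == ℓ')) := by
  intro l
  induction l with
  | nil => intro _; simp
  | cons ℓ' rest ih =>
    intro h
    have hx : (key x == ℓ') = false := by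
      simp only [beq_eq_false_iff_ne, ne_eq]
      exact fun hc => h ℓ' (by simp) hc.symm
    simp only [List.flatMap_cons]
    rw [ih (fun a ha hc => h a (by simp [ha]) hc)]
    congr 1
    rw [List.filter_append]
    simp [hx]

lemma pvMem_flatMap_buckets {α : Type} (key : α → Int) (ys : List α) (ℓs : List Int) (y : α)
    (hy : y ∈ ℓs.flatMap (fun ℓ => ys.filter (fun z => key z == ℓ))) : key y ∈ ℓs := by
  rw [List.mem_flatMap] at hy
  obtain ⟨ℓ, hℓ, hyf⟩ := hy
  have := List.of_mem_filter hyf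
  rw [beq_iff_eq] at this
  rwa [this]

lemma pvInsert_buckets {α : Type} (key : α → Int) (x : α) (ys : List α) :
    ∀ (ℓs : List Int), ℓs.Pairwise (fun a b => b < a) → key x ∈ ℓs →
      PySem.List.insertBy (fun a b => decide (key b < key a)) x
          (ℓs.flatMap (fun ℓ => ys.filter (fun y => key y == ℓ)))
        = ℓs.flatMap (fun ℓ => (ys ++ [x]).filter (fun y => key y == ℓ)) := by
  intro ℓs
  induction ℓs with
  | nil => intro _ h; simp at h
  | cons ℓ rest ih =>
    intro hpw hx
    have hlt : ∀ b ∈ rest, b < ℓ := (List.pairwise_cons.mp hpw).1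
    have hpw' : rest.Pairwise (fun a b => b < a) := (List.pairwise_cons.mp hpw).2
    simp only [List.flatMap_cons]
    by_cases hxl : key x = ℓ
    · rw [pvInsertBy_skip _ _ _ _ (fun y hy => by
        have hky : key y = ℓ := by
          have := List.of_mem_filter hy
          rwa [beq_iff_eq] at this
        simp [hky, hxl])]
      rw [pvInsertBy_front _ _ _ (fun y hy => by
        have hky := pvMem_flatMap_buckets key ys rest y hy
        have : key y < ℓ := hlt _ hky
        simp only [decide_eq_true_eq]
        omega)]
      have hbx : (ys ++ [x]).filter (fun y => key y == ℓ)
          = ys.filter (fun y => key y == ℓ) ++ [x] := by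
        rw [List.filter_append]
        simp [hxl]
      rw [hbx, pvFlatMap_filter_not key x ys rest (fun a ha hc => by
        have := hlt a ha
        omega)]
      simp
    · have hxr : key x ∈ rest := by
        rcases List.mem_cons.mp hx with h | h
        · exact absurd h hxl
        · exact h
      rw [pvInsertBy_skip _ _ _ _ (fun y hy => by
        have hky : key y = ℓ := by
          have := List.of_mem_filter hy
          rwa [beq_iff_eq] at this
        have : key x < ℓ := hlt _ hxr
        simp only [decide_eq_false_iff_not]
        omega)]
      rw [ih hpw' hxr]
      have hbx : (ys ++ [x]).filter (fun y => key y == ℓ) = ys.filter (fun y => key y == ℓ) := by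
        rw [List.filter_append]
        have : (key x == ℓ) = false := by
          simp only [beq_eq_false_iff_ne, ne_eq]
          exact hxl
        simp [this]
      rw [hbx]

-- stable descending sort of a list whose keys all lie in a strictly descending key list ℓs
-- equals the concatenation of its key buckets in ℓs order
lemma pvSorted_buckets {α : Type} (key : α → Int) :
    ∀ (xs : List α) (ℓs : List Int), ℓs.Pairwise (fun a b => b < a) → (∀ x ∈ xs, key x ∈ ℓs) →
      PySem.List.sorted xs key true = ℓs.flatMap (fun ℓ => xs.filter (fun x => key x == ℓ)) := by
  intro xs
  induction xs using List.reverseRecOn with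
  | nil =>
    intro ℓs _ _
    rw [PySem.List.sorted_rev_eq_foldl_insertBy]
    simp
  | append_singleton ys x ih =>
    intro ℓs hpw hmem
    rw [PySem.List.sorted_rev_eq_foldl_insertBy, List.foldl_append]
    simp only [List.foldl_cons, List.foldl_nil]
    rw [← PySem.List.sorted_rev_eq_foldl_insertBy,
      ih ℓs hpw (fun y hy => hmem y (by simp [hy]))]
    exact pvInsert_buckets key x ys ℓs hpw (hmem x (by simp))

lemma pvFilter_flatMap {α β : Type} (l : List α) (f : α → List β) (p : β → Bool) :
    (l.flatMap f).filter p = l.flatMap (fun a => (f a).filter p) := by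
  induction l with
  | nil => simp
  | cons a l ih => simp [List.flatMap_cons, List.filter_append, ih]

lemma pvFlatMap_ite {α β : Type} (l : List α) (p : α → Bool) (f : α → β) :
    l.flatMap (fun a => if p a then [f a] else []) = (l.filter p).map f := by
  induction l with
  | nil => simp
  | cons a l ih =>
    by_cases h : p a = true
    · simp [List.flatMap_cons, h, ih]
    · simp only [List.flatMap_cons, List.filter_cons, h]
      simpa using ih

lemma pvCap_cast (seq : List Int) (max_len : Option Int) :
    (match max_len with
      | none => ((seq.length : Int))
      | some m => max 1 (m + 1)) = ((pvCapN seq max_len : Nat) : Int) := by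
  cases max_len with
  | none => simp [pvCapN]
  | some m => simp only [pvCapN]; omega

lemma pvAlt_eq (seq : List Int) (max_len : Option Int) :
    find_all_longest_alt seq max_len
      = pvFin (pvLoopB seq (match max_len with
          | none => ((seq.length : Int))
          | some m => max 1 (m + 1)) (PySem.List.pyRange ((seq.length : Int) - 2) 0 (-1)) 0 []) := rfl

-- A's filtered flatMap, filtered at one key value, is that key's bucket
lemma pvFilter_bucket (seq : List Int) (max_len : Option Int) (u : Nat) (hu : 1 ≤ u) :
    ((pvD seq).flatMap (pvGA seq max_len)).filter (fun p => p.2 == ((u : Nat) : Int))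
      = pvBucket seq max_len u := by
  rw [pvFilter_flatMap]
  have hpt : ∀ i : Nat, ((pvGA seq max_len i).filter (fun p => p.2 == ((u : Nat) : Int)))
      = if pvL seq max_len i == u then [((i : Int) + 1, ((u : Nat) : Int))] else [] := by
    intro i
    unfold pvGA
    by_cases h : 0 < pvL seq max_len i
    · rw [if_pos h]
      by_cases he : pvL seq max_len i = u
      · simp [he]
      · have hne : ((pvL seq max_len i : Int) == ((u : Nat) : Int)) = false := by
          simp only [beq_eq_false_iff_ne, ne_eq, Int.natCast_inj]
          exact he
        simp [hne, he]
    · rw [if_neg h]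
      have he : ¬ (pvL seq max_len i = u) := by omega
      simp [he]
  simp only [hpt]
  rw [pvFlatMap_ite]
  rfl

theorem pv_main (seq : List Int) (max_len : Option Int) :
    find_all_longest seq max_len = find_all_longest_alt seq max_len := by
  by_cases hn : 3 ≤ seq.length
  · -- common quantities
    have hcap1 : 1 ≤ pvCapN seq max_len := by
      cases max_len with
      | none => simp only [pvCapN]; omega
      | some m => simp only [pvCapN]; omega
    -- ===== A side =====
    have hcast2 : ((seq.length : Int) - 2) = ((seq.length - 2 : Nat) : Int) := by omega
    have hA : find_all_longest seq max_len
        = PySem.List.sorted ((pvD seq).flatMap (pvGA seq max_len)) (fun p => p.2) true := by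
      unfold find_all_longest
      rw [hcast2, pvOuterA_eq seq max_len (seq.length - 2) [] (by omega), List.nil_append]
      rfl
    have hsort : PySem.List.sorted ((pvD seq).flatMap (pvGA seq max_len)) (fun p => p.2) true
        = ((List.range' 1 (pvCapN seq max_len)).reverse).flatMap (pvBucket seq max_len) := by
      rw [pvSorted_buckets (fun p : Int × Int => p.2) ((pvD seq).flatMap (pvGA seq max_len))
        (((List.range' 1 (pvCapN seq max_len)).reverse).map (fun u : Nat => (u : Int)))
        (by
          rw [List.pairwise_map, List.pairwise_reverse]
          exact (List.pairwise_lt_range' 1).imp (fun h => by exact_mod_cast h))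
        (by
          intro x hx
          rw [List.mem_flatMap] at hx
          obtain ⟨i, hiD, hxg⟩ := hx
          unfold pvGA at hxg
          by_cases h : 0 < pvL seq max_len i
          · rw [if_pos h, List.mem_singleton] at hxg
            subst hxg
            rw [List.mem_map]
            refine ⟨pvL seq max_len i, ?_, rfl⟩
            rw [List.mem_reverse, List.mem_range'_1]
            have : pvL seq max_len i ≤ pvCapN seq max_len := by unfold pvL; omega
            omega
          · rw [if_neg h] at hxg
            simp at hxg)]
      rw [List.flatMap_map]
      apply List.flatMap_congr
      intro u hu
      rw [List.mem_reverse, List.mem_range'_1] at hu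
      exact pvFilter_bucket seq max_len u hu.1
    -- ===== B side =====
    have hfilter0 : (pvD seq).filter (fun i => decide (0 ≤ pvMl seq i 0)) = pvD seq :=
      List.filter_eq_self.mpr (fun a _ => by simp)
    have hactive0 : PySem.List.pyRange ((seq.length : Int) - 2) 0 (-1) = pvActive seq 0 := by
      unfold pvActive
      rw [hfilter0]
      unfold pvD
      have h1 : (((seq.length : Int) - 2 + 1 - (0 + 1)).toNat) = seq.length - 2 := by omega
      rw [PySem.List.pyRange_neg_one_eq_reverse, PySem.List.pyRange_one, h1,
        List.range'_eq_map_range, ← List.map_reverse, ← List.map_reverse, List.map_map]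
      apply List.map_congr_left
      intro k _
      simp only [Function.comp_apply]
      push_cast
      ring
    have hB : find_all_longest_alt seq max_len
        = pvFin (pvLoopB seq ((pvCapN seq max_len : Nat) : Int) (pvActive seq 0) 0 []) := by
      rw [pvAlt_eq seq max_len, pvCap_cast seq max_len, hactive0]
    have hA0 : pvActive seq 0 ≠ [] := by
      have hlen : (pvActive seq 0).length = seq.length - 2 := by
        unfold pvActive
        rw [hfilter0]
        simp [pvD]
      intro hc
      rw [hc] at hlen
      simp at hlen
      omega
    have hmem0 : ∀ i ∈ (pvD seq).filter (fun i => decide (0 ≤ pvMl seq i 0)),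
        i + 2 ≤ seq.length := by
      intro i hi
      have hiD : i ∈ pvD seq := List.mem_of_mem_filter hi
      unfold pvD at hiD
      rw [List.mem_reverse, List.mem_range'_1] at hiD
      omega
    have hstep0 : pvLoopB seq ((pvCapN seq max_len : Nat) : Int) (pvActive seq 0) 0 []
        = pvLoopB seq ((pvCapN seq max_len : Nat) : Int) (pvActive seq 1) ((1 : Nat) : Int) [] := by
      have hsurv : (((pvD seq).filter (fun i => decide (0 ≤ pvMl seq i 0))).filter
          (fun i => pvOk seq i 0)) = (pvD seq).filter (fun i => decide (1 ≤ pvMl seq i 0)) := by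
        rw [List.filter_filter]
        apply List.filter_congr
        intro i _
        cases h2 : pvOk seq i 0 with
        | false =>
          have hmlt := (pvDie_iff seq i 0).mp ⟨Nat.zero_le _, h2⟩
          have hn1 : ¬ (1 ≤ pvMl seq i 0) := by omega
          simp [hn1]
        | true =>
          have hs := (pvSurv_iff seq i 0).mp ⟨Nat.zero_le _, h2⟩
          simp [hs]
      rw [pvLoopB, dif_pos ⟨hA0, by exact_mod_cast hcap1⟩]
      have hfold := pvFoldB_eq seq 0 ((pvD seq).filter (fun i => decide (0 ≤ pvMl seq i 0)))
        [] [] hmem0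
      rw [Nat.cast_zero] at hfold
      dsimp only
      unfold pvActive
      rw [hfold, hsurv]
      norm_num
    have hloop := pvLoopB_eq seq max_len (pvCapN seq max_len) 1 [] (by omega) hcap1 (by omega)
    rw [hA, hsort, hB, hstep0, hloop]
    have hr : pvCapN seq max_len - 1 + 1 = pvCapN seq max_len := by omega
    rw [hr]
    unfold pvFlatG
    simp
  · -- seq too short: both sides are []
    have hA : find_all_longest seq max_len = [] := by
      unfold find_all_longest
      rw [pvOuterA, dif_neg (by omega)]
      rw [PySem.List.sorted_rev_eq_foldl_insertBy]
      rfl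
    have hB : find_all_longest_alt seq max_len = [] := by
      rw [pvAlt_eq seq max_len,
        PySem.List.pyRange_neg_one_eq_nil (by omega : (seq.length : Int) - 2 ≤ 0)]
      rw [pvLoopB, dif_neg (by simp)]
      unfold pvFin
      simp
    rw [hA, hB]

-- ===== VERDICT (by name: the statement is the Claim_ definition above) =====
theorem find_all_longest_spec : Claim_equal_find_all_longest := by
  intro seq max_len _
  unfold Spec_find_all_longest
  exact pv_main seq max_len
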